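-- pv_equiv track=rewrite | github.com/semenko/rseqc-redux | rseqc/bam_cigar.py | fetch_deletion
-- ===== SOURCE A (Python) =====
-- def fetch_deletion(chrom: str, st: int, cigar: list[tuple[int, int]]) -> list[tuple[str, int, int]]:
--     """fetch deletion regions defined by cigar. st must be zero based
--     return list of tuple of (chrom,st, end)
--     """
--     # match = re.compile(r'(\d+)(\D)')
--     chrom_st = st
--     del_bound = []
--     for c, s in cigar:  # code and size
--         if c == 0:  # match
--             chrom_st += s
--         elif c == 1:  # insertion to ref
--             continue
--         elif c == 2:  # deletion to ref
--             del_bound.append((chrom, chrom_st, chrom_st + s))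
--             chrom_st += s
--         elif c == 3:  # gap or intron
--             chrom_st += s
--         elif c == 4:  # soft clipping. We do NOT include soft clip as part of exon
--             chrom_st += s
--         else:
--             continue
--     return del_bound
-- ===== SOURCE B (Python) =====
-- def fetch_deletion(chrom: str, st: int, cigar: list[tuple[int, int]]) -> list[tuple[str, int, int]]:
--     """Structural recursion with relative offsets: rec(ops) returns the
--     deletion spans of ops relative to offset 0 (no running position, no st);
--     each level shifts the recursive result by its own op's advance.  chrom
--     and st are applied once at the end."""
--     def rec(ops):
--         if not ops:
--             return []
--         (c, s) = ops[0]
--         adv = s if c in (0, 2, 3, 4) else 0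
--         tail = [(o + adv, z) for o, z in rec(ops[1:])]
--         return [(0, s)] + tail if c == 2 else tail
--     return [(chrom, st + o, st + o + z) for o, z in rec(cigar)]
-- ===== Notes on version B (the rewrite author's own statement) =====
-- stated objective: alternative
-- what changed: Replaces the forward position-threading loop by a structural recursion that computes the suffix's deletion spans relative to offset 0 and shifts them by each op's advance on the way out, applying chrom/st once at the top.
import Mathlib
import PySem

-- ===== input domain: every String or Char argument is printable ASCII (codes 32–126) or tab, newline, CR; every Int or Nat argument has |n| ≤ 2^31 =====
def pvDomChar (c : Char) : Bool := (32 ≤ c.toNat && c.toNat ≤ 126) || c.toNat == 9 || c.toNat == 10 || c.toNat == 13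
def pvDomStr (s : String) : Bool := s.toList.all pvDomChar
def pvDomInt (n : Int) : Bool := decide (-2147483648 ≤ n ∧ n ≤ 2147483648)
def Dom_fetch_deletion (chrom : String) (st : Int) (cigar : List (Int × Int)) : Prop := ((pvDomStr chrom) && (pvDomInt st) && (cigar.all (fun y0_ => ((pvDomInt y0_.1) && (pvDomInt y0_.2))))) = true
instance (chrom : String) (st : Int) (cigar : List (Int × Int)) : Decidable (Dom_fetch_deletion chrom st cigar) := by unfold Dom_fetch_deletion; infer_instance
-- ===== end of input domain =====

-- B replaces the forward position-threading loop by a structural recursion that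
-- returns the suffix's deletion spans relative to offset 0, shifted on the way
-- out; chrom and st are applied once at the top (objective: alternative).
-- ===== PORT A =====
-- one iteration of A's loop body (the if/elif chain over one cigar op)
def pvStepA (chrom : String) (state : Int × List (String × Int × Int)) (cs : Int × Int) :
    Int × List (String × Int × Int) :=
  let c := cs.1
  let s := cs.2
  let chrom_st := state.1
  let del_bound := state.2
  if c = 0 then (chrom_st + s, del_bound)
  else if c = 1 then (chrom_st, del_bound)
  else if c = 2 then (chrom_st + s, del_bound ++ [(chrom, chrom_st, chrom_st + s)])
  else if c = 3 then (chrom_st + s, del_bound)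
  else if c = 4 then (chrom_st + s, del_bound)
  else (chrom_st, del_bound)

def fetch_deletion (chrom : String) (st : Int) (cigar : List (Int × Int)) : List (String × Int × Int) :=
  (cigar.foldl (pvStepA chrom) (st, [])).2

-- ===== PORT B =====
-- rec: deletion spans (offset, size) of the ops, relative to offset 0
def pvRec (ops : List (Int × Int)) : List (Int × Int) :=
  match ops with
  | [] => []
  | (c, s) :: rest =>
    let adv := if c = 0 ∨ c = 2 ∨ c = 3 ∨ c = 4 then s else 0
    let tail := (pvRec rest).map (fun oz => (oz.1 + adv, oz.2))
    if c = 2 then (0, s) :: tail else tail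

def fetch_deletion_alt (chrom : String) (st : Int) (cigar : List (Int × Int)) : List (String × Int × Int) :=
  (pvRec cigar).map (fun oz => (chrom, st + oz.1, st + oz.1 + oz.2))

-- ===== PRECONDITION & SPEC =====
def Spec_fetch_deletion (chrom : String) (st : Int) (cigar : List (Int × Int)) (out : List (String × Int × Int)) : Prop := out = fetch_deletion_alt chrom st cigar
instance (chrom : String) (st : Int) (cigar : List (Int × Int)) (out : List (String × Int × Int)) : Decidable (Spec_fetch_deletion chrom st cigar out) := by unfold Spec_fetch_deletion; infer_instance

-- ===== CLAIM =====
def Claim_equal_fetch_deletion : Prop := ∀ (chrom : String) (st : Int) (cigar : List (Int × Int)), Dom_fetch_deletion chrom st cigar → Spec_fetch_deletion chrom st cigar (fetch_deletion chrom st cigar)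

-- ===== LEMMAS AND PROOFS =====
-- shifting the relative spans commutes with growing the base start by adv
-- peel one op off B's result
theorem alt_cons (chrom : String) (st c s : Int) (rest : List (Int × Int)) :
    fetch_deletion_alt chrom st ((c, s) :: rest)
      = (if c = 2 then [(chrom, st, st + s)] else [])
          ++ fetch_deletion_alt chrom
              (st + (if c = 0 ∨ c = 2 ∨ c = 3 ∨ c = 4 then s else 0)) rest := by
  by_cases h2 : c = 2
  · simp [fetch_deletion_alt, pvRec, h2, List.map_map]
    intro a b _
    ring
  · simp [fetch_deletion_alt, pvRec, h2, List.map_map]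
    intro a b _
    split_ifs <;> ring

theorem fetch_deletion_loop (chrom : String) (cigar : List (Int × Int)) :
    ∀ (st : Int) (acc : List (String × Int × Int)),
    (cigar.foldl (pvStepA chrom) (st, acc)).2
      = acc ++ fetch_deletion_alt chrom st cigar := by
  induction cigar with
  | nil => intro st acc; simp [fetch_deletion_alt, pvRec]
  | cons cs rest ih =>
    intro st acc
    obtain ⟨c, s⟩ := cs
    rw [List.foldl_cons, alt_cons]
    by_cases h0 : c = 0
    · rw [show pvStepA chrom (st, acc) (c, s) = (st + s, acc) by simp [pvStepA, h0]]
      simp [ih, h0]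
    · by_cases h1 : c = 1
      · rw [show pvStepA chrom (st, acc) (c, s) = (st, acc) by simp [pvStepA, h0, h1]]
        simp [ih, h1]
      · by_cases h2 : c = 2
        · rw [show pvStepA chrom (st, acc) (c, s)
              = (st + s, acc ++ [(chrom, st, st + s)]) by simp [pvStepA, h0, h1, h2]]
          simp [ih, h2]
        · by_cases h3 : c = 3
          · rw [show pvStepA chrom (st, acc) (c, s) = (st + s, acc) by
              simp [pvStepA, h0, h1, h2, h3]]
            simp [ih, h2, h3]
          · by_cases h4 : c = 4
            · rw [show pvStepA chrom (st, acc) (c, s) = (st + s, acc) by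
                simp [pvStepA, h0, h1, h2, h3, h4]]
              simp [ih, h2, h4]
            · rw [show pvStepA chrom (st, acc) (c, s) = (st, acc) by
                simp [pvStepA, h0, h1, h2, h3, h4]]
              simp [ih, h0, h1, h2, h3, h4]

-- ===== VERDICT =====
theorem fetch_deletion_spec : Claim_equal_fetch_deletion := by
  intro chrom st cigar _
  unfold Spec_fetch_deletion fetch_deletion
  simpa using fetch_deletion_loop chrom cigar st []
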